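-- pv_equiv track=rewrite | github.com/MichaelTA0111/Professional-Engineering-Coursework | Desktop Application Source/DatabaseManager.py | determine_heading_labels
-- ===== SOURCE A (Python) =====
-- def determine_heading_labels(headings):
--     """
--     Function to determine the labels to be used in the legend of the graph
--     :param headings: The column headings which are being queried
--     :return: An array of the labels as strings
--     """
--     heading_labels = headings.split(', ')  # Split the headings into individual strings in an array
--     labels = []
--     for string in heading_labels:
--         i = 0
--         make_upper = [0]  # An array to store the letters which are to be capitalised
--         label = ''
--         for char in string:
--             if char == '_':
--                 label += ' '  # Convert all underscores to spaces
--                 make_upper.append(i + 1)  # Capitalise each new word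
--             elif i in make_upper:
--                 label += char.upper()  # Add a capital letter
--             else:
--                 label += char  # Add a character
--             i += 1
--         labels.append(label)
--     return labels
-- ===== SOURCE B (Python) =====
-- def determine_heading_labels(headings):
--     return [' '.join(w[:1].upper() + w[1:] for w in h.split('_'))
--             for h in headings.split(', ')]
-- ===== Notes on version B (the rewrite author's own statement) =====
-- stated objective: simpler
-- what changed: A scans each heading character by character while maintaining a growing make_upper list of indices to capitalise; B splits each heading on the underscore separator, uppercases only the first character of each word (keeping the rest verbatim), and joins the words with single spaces.
import Mathlib
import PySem

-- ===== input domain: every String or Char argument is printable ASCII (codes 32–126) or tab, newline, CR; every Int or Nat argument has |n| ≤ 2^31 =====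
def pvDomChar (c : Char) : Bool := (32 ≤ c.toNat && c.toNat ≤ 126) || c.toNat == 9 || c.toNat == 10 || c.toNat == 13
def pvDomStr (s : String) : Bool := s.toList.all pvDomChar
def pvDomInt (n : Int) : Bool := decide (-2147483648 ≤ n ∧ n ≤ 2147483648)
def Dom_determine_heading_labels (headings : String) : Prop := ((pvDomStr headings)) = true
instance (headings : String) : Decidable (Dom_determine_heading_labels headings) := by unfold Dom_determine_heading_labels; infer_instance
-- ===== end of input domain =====

-- B replaces A's per-character scan with its `make_upper` index list by a per-word mapping
-- (split on '_', uppercase each word's first character, join with spaces); objective: simpler.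

-- ===== PORT A =====
-- one iteration of A's inner `for char in string` loop: state = (i, make_upper, label)
def dhlStep (st : Int × List Int × List Char) (c : Char) : Int × List Int × List Char :=
  match st with
  | (i, make_upper, label) =>
    if c = '_' then (i + 1, make_upper ++ [i + 1], label ++ [' '])
    else if make_upper.contains i then (i + 1, make_upper, label ++ [PySem.Chars.upperChar c])
    else (i + 1, make_upper, label ++ [c])

def determine_heading_labels (headings : String) : List String :=
  (PySem.Chars.splitOn headings.toList (", ".toList)).foldl
    (fun labels s => labels ++ [String.ofList (s.foldl dhlStep (0, [0], [])).2.2]) []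

-- ===== PORT B =====
-- w[:1].upper() + w[1:]
def dhlWord (w : List Char) : List Char :=
  PySem.Chars.upper (PySem.List.slice w none (some 1)) ++ PySem.List.slice w (some 1) none

def determine_heading_labels_alt (headings : String) : List String :=
  (PySem.Chars.splitOn headings.toList (", ".toList)).map
    (fun h => String.ofList (PySem.Chars.join [' '] ((PySem.Chars.splitOn h ['_']).map dhlWord)))

-- ===== PRECONDITION & SPEC =====
def Spec_determine_heading_labels (headings : String) (out : List String) : Prop := out = determine_heading_labels_alt headings
instance (headings : String) (out : List String) : Decidable (Spec_determine_heading_labels headings out) := by unfold Spec_determine_heading_labels; infer_instance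

-- ===== CLAIM (what is proved, stated in full; the proofs are below) =====
def Claim_equal_determine_heading_labels : Prop := ∀ (headings : String), Dom_determine_heading_labels headings → Spec_determine_heading_labels headings (determine_heading_labels headings)

-- ===== LEMMAS AND PROOFS =====

-- PySem.Chars.splitOn with the single-character separator '_' is Mathlib's List.splitOnP
lemma dhl_go_splitOnP (fuel : Nat) (l cur : List Char) (acc : List (List Char))
    (h : l.length ≤ fuel) :
    PySem.Chars.splitOn.go ['_'] fuel l cur acc
      = acc.reverse ++ (List.splitOnP (fun c => c == '_') l).modifyHead (cur.reverse ++ ·) := by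
  induction fuel generalizing l cur acc with
  | zero =>
    cases l with
    | nil => simp [PySem.Chars.splitOn.go, List.splitOnP_nil]
    | cons c rest => simp at h
  | succ f ih =>
    cases l with
    | nil => simp [PySem.Chars.splitOn.go, List.splitOnP_nil]
    | cons c rest =>
      simp only [List.length_cons, Nat.add_le_add_iff_right] at h
      by_cases hc : c = '_'
      · subst hc
        have hpre : List.isPrefixOf ['_'] ('_' :: rest) = true := by
          simp [List.isPrefixOf]
        simp only [PySem.Chars.splitOn.go, hpre, if_pos, List.length_cons, List.length_nil,
          Nat.zero_add, List.drop_succ_cons, List.drop_zero]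
        rw [ih rest [] (cur.reverse :: acc) h]
        simp only [List.splitOnP_cons, beq_self_eq_true, if_pos, List.reverse_cons,
          List.reverse_nil, List.nil_append, List.modifyHead_cons, List.append_assoc,
          List.cons_append, List.nil_append, List.append_nil]
        exact congrArg (fun t => acc.reverse ++ cur.reverse :: t)
          (congrFun List.modifyHead_id (List.splitOnP (fun c => c == '_') rest))
      · have hpre : List.isPrefixOf ['_'] (c :: rest) = false := by
          show (('_' == c) && List.isPrefixOf [] rest) = false
          rw [beq_eq_false_iff_ne.mpr (Ne.symm hc)]
          rfl
        simp only [PySem.Chars.splitOn.go, hpre]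
        rw [if_neg (by simp), ih rest (c :: cur) acc h]
        have hne := List.splitOnP_ne_nil (fun c => c == '_') rest
        cases hrest : List.splitOnP (fun c => c == '_') rest with
        | nil => exact absurd hrest hne
        | cons w ws =>
          simp [List.splitOnP_cons, hc, hrest, List.modifyHead]

lemma dhl_splitOn_underscore (cs : List Char) :
    PySem.Chars.splitOn cs ['_'] = List.splitOnP (fun c => c == '_') cs := by
  have h := dhl_go_splitOnP (cs.length + 1) cs [] [] (by omega)
  simp only [List.reverse_nil, List.nil_append] at h
  rw [PySem.Chars.splitOn, h]
  exact congrFun List.modifyHead_id _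

-- the intended per-character recursion: a flag says whether the next letter is capitalised
def dhlG : Bool → List Char → List Char
  | _, [] => []
  | cap, c :: cs =>
      if c = '_' then ' ' :: dhlG true cs
      else (if cap then PySem.Chars.upperChar c else c) :: dhlG false cs

lemma dhlWord_nil : dhlWord [] = [] := by decide

lemma dhlWord_cons (c : Char) (w : List Char) :
    dhlWord (c :: w) = PySem.Chars.upperChar c :: w := by
  simp [dhlWord, PySem.List.slice, PySem.List.clampIdx, PySem.Chars.upper]

-- A's inner fold computes dhlG, given the invariant A maintains on (i, make_upper)
lemma dhlStep_underscore (i : Int) (mu : List Int) (label : List Char) :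
    dhlStep (i, mu, label) '_' = (i + 1, mu ++ [i + 1], label ++ [' ']) := by
  simp [dhlStep]

lemma dhlStep_char (i : Int) (mu : List Int) (label : List Char) (c : Char) (hc : c ≠ '_') :
    dhlStep (i, mu, label) c
      = if mu.contains i then (i + 1, mu, label ++ [PySem.Chars.upperChar c])
        else (i + 1, mu, label ++ [c]) := by
  simp [dhlStep, hc]

lemma dhl_fold_eq_g (cs : List Char) : ∀ (i : Int) (mu : List Int) (label : List Char) (cap : Bool),
    (∀ j ∈ mu, j ≤ i) → mu.contains i = cap →
    (cs.foldl dhlStep (i, mu, label)).2.2 = label ++ dhlG cap cs := by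
  induction cs with
  | nil => intro i mu label cap _ _; simp [dhlG]
  | cons c rest ih =>
    intro i mu label cap hle hcap
    rw [List.foldl_cons]
    by_cases hc : c = '_'
    · subst hc
      rw [dhlStep_underscore,
        ih (i + 1) (mu ++ [i + 1]) (label ++ [' ']) true
          (by intro j hj; rcases List.mem_append.mp hj with h | h
              · exact le_trans (hle j h) (by omega)
              · simp at h; omega)
          (by simp [List.contains_eq_mem])]
      simp [dhlG]
    · have hnot : mu.contains (i + 1) = false := by
        simp only [List.contains_eq_mem, decide_eq_false_iff_not]
        intro hmem
        have := hle _ hmem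
        omega
      have hinv : ∀ j ∈ mu, j ≤ i + 1 := fun j hj => le_trans (hle j hj) (by omega)
      rw [dhlStep_char i mu label c hc, hcap]
      cases cap with
      | true =>
        rw [if_pos rfl, ih (i + 1) mu (label ++ [PySem.Chars.upperChar c]) false hinv hnot]
        simp [dhlG, hc]
      | false =>
        rw [if_neg (by simp), ih (i + 1) mu (label ++ [c]) false hinv hnot]
        simp [dhlG, hc]

-- join distributes one character off the first word
lemma dhl_join_cons (x : Char) (w : List Char) (L : List (List Char)) :
    PySem.Chars.join [' '] ((x :: w) :: L) = x :: PySem.Chars.join [' '] (w :: L) := by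
  cases L with
  | nil => rw [PySem.Chars.join_singleton, PySem.Chars.join_singleton]
  | cons v vs => rw [PySem.Chars.join_cons_cons, PySem.Chars.join_cons_cons]; simp

lemma dhl_join_nil_cons (q : List Char) (L : List (List Char)) :
    PySem.Chars.join [' '] ([] :: q :: L) = ' ' :: PySem.Chars.join [' '] (q :: L) := by
  rw [PySem.Chars.join_cons_cons]; simp

-- dhlG is B's split / map / join, for both values of the flag
lemma dhl_g_join (cs : List Char) :
    (dhlG true cs
       = PySem.Chars.join [' '] ((List.splitOnP (fun c => c == '_') cs).map dhlWord))
  ∧ (dhlG false cs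
       = PySem.Chars.join [' ']
           ((List.splitOnP (fun c => c == '_') cs).headI
              :: ((List.splitOnP (fun c => c == '_') cs).tail.map dhlWord))) := by
  induction cs with
  | nil => constructor <;> simp [dhlG, List.splitOnP_nil, dhlWord_nil, PySem.Chars.join_singleton]
  | cons c rest ih =>
    obtain ⟨ihT, ihF⟩ := ih
    have hne := List.splitOnP_ne_nil (fun c => c == '_') rest
    cases hrest : List.splitOnP (fun c => c == '_') rest with
    | nil => exact absurd hrest hne
    | cons w ws =>
      rw [hrest] at ihT ihF
      simp only [List.headI, List.tail_cons] at ihF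
      by_cases hc : c = '_'
      · subst hc
        have hsp : List.splitOnP (fun c => c == '_') ('_' :: rest) = [] :: w :: ws := by
          rw [List.splitOnP_cons, hrest]; rfl
        have hg1 : dhlG true ('_' :: rest) = ' ' :: dhlG true rest := by simp [dhlG]
        have hg0 : dhlG false ('_' :: rest) = ' ' :: dhlG true rest := by simp [dhlG]
        constructor
        · rw [hg1, hsp, List.map_cons, dhlWord_nil, List.map_cons, dhl_join_nil_cons, ihT,
            List.map_cons]
        · rw [hg0, hsp]
          simp only [List.headI, List.tail_cons]
          rw [List.map_cons, dhl_join_nil_cons, ihT, List.map_cons]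
      · have hsp : List.splitOnP (fun c => c == '_') (c :: rest) = (c :: w) :: ws := by
          rw [List.splitOnP_cons, beq_eq_false_iff_ne.mpr hc, hrest]; rfl
        have hg1 : dhlG true (c :: rest) = PySem.Chars.upperChar c :: dhlG false rest := by
          simp [dhlG, hc]
        have hg0 : dhlG false (c :: rest) = c :: dhlG false rest := by simp [dhlG, hc]
        constructor
        · rw [hg1, hsp, List.map_cons, dhlWord_cons, dhl_join_cons, ihF]
        · rw [hg0, hsp]
          simp only [List.headI, List.tail_cons]
          rw [dhl_join_cons, ihF]

-- per heading: A's inner loop equals B's word transformation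
lemma dhl_label_eq (s : List Char) :
    (s.foldl dhlStep (0, [0], [])).2.2
      = PySem.Chars.join [' '] ((PySem.Chars.splitOn s ['_']).map dhlWord) := by
  rw [dhl_fold_eq_g s 0 [0] [] true (by intro j hj; simp at hj; omega) (by decide),
    dhl_splitOn_underscore, (dhl_g_join s).1]
  simp

-- ===== VERDICT (by name: the statement is the Claim_ definition above) =====
theorem determine_heading_labels_spec : Claim_equal_determine_heading_labels := by
  intro headings _
  unfold Spec_determine_heading_labels determine_heading_labels determine_heading_labels_alt
  rw [PySem.List.foldl_append_singleton_eq_map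
    (fun s : List Char => String.ofList (List.foldl dhlStep ((0 : Int), ([0] : List Int), ([] : List Char)) s).2.2)]
  simp only [List.nil_append]
  exact List.map_congr_left (fun s _ => by rw [dhl_label_eq])
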